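-- pv_equiv track=rewrite | github.com/Rise-AGI/BMPT-Magnus | train/pbv_step.py | _split_plan_steps
-- ===== SOURCE A (Python) =====
-- def _split_plan_steps(plan_text: str, max_steps: int) -> list[str]:
--     text = plan_text.replace("\r", "\n")
--     chunks = []
--     for raw in text.split("\n"):
--         part = raw.strip()
--         if not part:
--             continue
--         for piece in part.split(";"):
--             item = piece.strip()
--             if item:
--                 chunks.append(item)
--     if not chunks:
--         stripped = plan_text.strip()
--         chunks = [stripped] if stripped else []
--     if max_steps > 0:
--         return chunks[:max_steps]
--     return chunks
-- ===== SOURCE B (Python) =====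
-- def _split_plan_steps(plan_text: str, max_steps: int) -> list[str]:
--     # single character scan: delimiters are '\r', '\n', ';'; tokens are stripped as flushed
--     chunks = []
--     cur = []
--     for ch in plan_text + "\n":
--         if ch in "\r\n;":
--             item = "".join(cur).strip()
--             if item:
--                 chunks.append(item)
--             cur = []
--         else:
--             cur.append(ch)
--     if not chunks:
--         stripped = plan_text.strip()
--         chunks = [stripped] if stripped else []
--     return chunks[:max_steps] if max_steps > 0 else chunks
-- ===== Notes on version B (the rewrite author's own statement) =====
-- stated objective: alternative
-- what changed: B replaces A's replace('\r','\n') pass, per-line split, and nested per-semicolon split/strip loops with a single character-at-a-time scan over plan_text that flushes a stripped token accumulator at every '\r'/'\n'/';'; fallback and truncation are unchanged.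
import Mathlib
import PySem

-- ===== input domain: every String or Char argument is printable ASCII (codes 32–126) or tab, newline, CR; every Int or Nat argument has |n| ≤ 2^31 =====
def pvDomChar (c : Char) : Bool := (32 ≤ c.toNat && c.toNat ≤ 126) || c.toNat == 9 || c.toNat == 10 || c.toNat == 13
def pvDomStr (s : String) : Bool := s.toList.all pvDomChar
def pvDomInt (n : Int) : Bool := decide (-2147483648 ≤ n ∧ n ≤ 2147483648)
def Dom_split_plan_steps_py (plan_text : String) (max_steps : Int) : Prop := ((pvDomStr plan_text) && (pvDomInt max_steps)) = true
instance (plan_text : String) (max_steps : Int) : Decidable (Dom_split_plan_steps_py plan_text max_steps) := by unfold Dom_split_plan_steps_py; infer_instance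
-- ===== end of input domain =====

-- B replaces A's replace+line-split+per-line-semicolon-split passes by one character-at-a-time
-- scan with an explicit token accumulator (objective: alternative, same asymptotic cost).

-- ===== PORT A =====
-- literal transliteration of _split_plan_steps: replace '\r'→'\n', split on '\n',
-- strip each line, split each nonempty line on ';', strip and collect nonempty pieces,
-- whole-text fallback, then truncation.
def split_plan_steps_py (plan_text : String) (max_steps : Int) : List String :=
  let text := PySem.Str.replace plan_text "\r" "\n"
  let chunks :=
    ((PySem.Str.split? text "\n").getD []).foldl (fun chunks raw =>
      let part := PySem.Str.strip raw
      if part = "" then chunks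
      else
        ((PySem.Str.split? part ";").getD []).foldl (fun chunks piece =>
          let item := PySem.Str.strip piece
          if item ≠ "" then chunks ++ [item] else chunks) chunks) []
  let chunks :=
    if chunks = [] then
      let stripped := PySem.Str.strip plan_text
      if stripped ≠ "" then [stripped] else []
    else chunks
  if max_steps > 0 then PySem.List.slice chunks none (some max_steps) else chunks

-- ===== PORT B =====
-- literal transliteration of Source B: one fold over the characters of plan_text + "\n",
-- state = (chunks so far, current token characters); "ch in '\r\n;'" is ported as the
-- explicit three-way comparison (exact for single characters); "".join(cur) is String.ofList.
def split_plan_steps_py_alt (plan_text : String) (max_steps : Int) : List String :=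
  let st :=
    (plan_text.toList ++ ['\n']).foldl (fun (st : List String × List Char) ch =>
      if ch == '\r' || ch == '\n' || ch == ';' then
        let item := PySem.Str.strip (String.ofList st.2)
        (if item ≠ "" then st.1 ++ [item] else st.1, [])
      else (st.1, st.2 ++ [ch])) ([], [])
  let chunks := st.1
  let chunks :=
    if chunks = [] then
      let stripped := PySem.Str.strip plan_text
      if stripped ≠ "" then [stripped] else []
    else chunks
  if max_steps > 0 then PySem.List.slice chunks none (some max_steps) else chunks

-- ===== PRECONDITION & SPEC =====
def Spec_split_plan_steps_py (plan_text : String) (max_steps : Int) (out : List String) : Prop := out = split_plan_steps_py_alt plan_text max_steps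
instance (plan_text : String) (max_steps : Int) (out : List String) : Decidable (Spec_split_plan_steps_py plan_text max_steps out) := by unfold Spec_split_plan_steps_py; infer_instance

-- ===== CLAIM (what is proved, stated in full; the proofs are below) =====
def Claim_equal_split_plan_steps_py : Prop := ∀ (plan_text : String) (max_steps : Int), Dom_split_plan_steps_py plan_text max_steps → Spec_split_plan_steps_py plan_text max_steps (split_plan_steps_py plan_text max_steps)

-- ===== LEMMAS AND PROOFS =====

-- character classes
def pvDelim (c : Char) : Bool := c == '\r' || c == '\n' || c == ';'
def pvD2 (c : Char) : Bool := c == '\r' || c == '\n'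
def pvSemi (c : Char) : Bool := c == ';'
def pvRepl (c : Char) : Char := if c == '\r' then '\n' else c

-- split a char list on a predicate (pieces between delimiter characters; always nonempty)
def pvSplitP (p : Char → Bool) : List Char → List (List Char)
  | [] => [[]]
  | c :: t => if p c then [] :: pvSplitP p t else (pvSplitP p t).modifyHead (c :: ·)

def pvFstrip (l : List Char) : Option (List Char) :=
  let q := PySem.Chars.strip l
  if q = [] then none else some q

def pvCore (cs : List Char) : List (List Char) := (pvSplitP pvDelim cs).filterMap pvFstrip

def pvGS (l : List Char) : List (List Char) := (pvSplitP pvSemi l).filterMap pvFstrip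

-- append w to the last piece
def pvLastAppend : List (List Char) → List Char → List (List Char)
  | [], w => [w]
  | [x], w => [x ++ w]
  | x :: xs, w => x :: pvLastAppend xs w

theorem pvSplitP_ne_nil (p : Char → Bool) (l : List Char) : pvSplitP p l ≠ [] := by
  induction l with
  | nil => simp [pvSplitP]
  | cons c t ih =>
    simp only [pvSplitP]
    split
    · simp
    · cases h : pvSplitP p t with
      | nil => exact absurd h ih
      | cons a r => simp

theorem pvModifyHead_nil_append (X : List (List Char)) : X.modifyHead (([] : List Char) ++ ·) = X := by
  cases X <;> simp

theorem pvModifyHead_comp (X : List (List Char)) (c : Char) (u : List Char) :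
    (X.modifyHead (c :: ·)).modifyHead (u ++ ·) = X.modifyHead ((u ++ [c]) ++ ·) := by
  cases X <;> simp

theorem pvSplitOn_go (d : Char) (fuel : Nat) (l cur acc : _) (h : l.length ≤ fuel) :
    PySem.Chars.splitOn.go [d] fuel l cur acc
      = acc.reverse ++ (pvSplitP (fun c => c == d) l).modifyHead (cur.reverse ++ ·) := by
  induction fuel generalizing l cur acc with
  | zero =>
    have hl : l = [] := List.eq_nil_of_length_eq_zero (Nat.le_zero.mp h)
    subst hl
    simp [PySem.Chars.splitOn.go, pvSplitP]
  | succ fuel ih =>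
    cases l with
    | nil => simp [PySem.Chars.splitOn.go, pvSplitP]
    | cons c t =>
      rw [PySem.Chars.splitOn.go]
      have hpre : ([d].isPrefixOf (c :: t)) = (d == c) := by simp [List.isPrefixOf]
      rw [hpre]
      have ht : t.length ≤ fuel := by simp at h; omega
      by_cases hdc : d = c
      · subst hdc
        rw [if_pos (by simp)]
        rw [show List.drop [d].length (d :: t) = t from by simp]
        rw [ih t [] (cur.reverse :: acc) ht]
        obtain ⟨h0, r0, hE⟩ := List.exists_cons_of_ne_nil (pvSplitP_ne_nil (fun x => x == d) t)
        simp [pvSplitP, hE]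
      · rw [if_neg (by simp; exact hdc)]
        rw [ih t (c :: cur) acc ht]
        obtain ⟨h0, r0, hE⟩ := List.exists_cons_of_ne_nil (pvSplitP_ne_nil (fun x => x == d) t)
        have hcd : (c == d) = false := by simp; exact fun hh => hdc hh.symm
        simp [pvSplitP, hE, hcd]

theorem pvSplitOn_single (l : List Char) (d : Char) :
    PySem.Chars.splitOn l [d] = pvSplitP (fun c => c == d) l := by
  rw [PySem.Chars.splitOn, pvSplitOn_go d (l.length + 1) l [] [] (by omega)]
  obtain ⟨h0, r0, hE⟩ := List.exists_cons_of_ne_nil (pvSplitP_ne_nil (fun c => c == d) l)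
  simp [hE]

theorem pvReplace_go (fuel : Nat) (l acc : List Char) (h : l.length ≤ fuel) :
    PySem.Chars.replace.go ['\x0d'] ['\n'] fuel l acc = acc.reverse ++ l.map pvRepl := by
  induction fuel generalizing l acc with
  | zero =>
    have hl : l = [] := List.eq_nil_of_length_eq_zero (Nat.le_zero.mp h)
    subst hl
    simp [PySem.Chars.replace.go]
  | succ fuel ih =>
    cases l with
    | nil => simp [PySem.Chars.replace.go]
    | cons c t =>
      rw [PySem.Chars.replace.go]
      have hpre : (['\x0d'].isPrefixOf (c :: t)) = ('\x0d' == c) := by simp [List.isPrefixOf]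
      rw [hpre]
      have ht : t.length ≤ fuel := by simp at h; omega
      by_cases hc : c = '\x0d'
      · subst hc
        rw [if_pos (by simp)]
        rw [show List.drop ['\x0d'].length ('\x0d' :: t) = t from by simp]
        rw [ih t _ ht]
        simp [pvRepl]
      · rw [if_neg (by simp [beq_iff_eq]; exact fun hh => hc hh.symm)]
        rw [ih t _ ht]
        have hcb : (c == '\x0d') = false := by simp [beq_iff_eq]; exact hc
        simp [pvRepl, hcb]

theorem pvReplace_single (l : List Char) :
    PySem.Chars.replace l ['\r'] ['\n'] = l.map pvRepl := by
  rw [PySem.Chars.replace]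
  simp only [List.isEmpty_cons, Bool.false_eq_true, ite_false]
  exact (pvReplace_go l.length l [] (le_refl _)).trans (by simp)

theorem pvSplitP_map_repl (l : List Char) :
    pvSplitP (fun c => c == '\n') (l.map pvRepl) = pvSplitP pvD2 l := by
  induction l with
  | nil => rfl
  | cons c t ih =>
    simp only [List.map_cons, pvSplitP, ih]
    by_cases h1 : c = '\r'
    · subst h1; simp [pvRepl, pvD2]
    · by_cases h2 : c = '\n'
      · subst h2; simp [pvRepl, pvD2]
      · have b1 : (c == '\r') = false := by simp [beq_iff_eq]; exact h1
        have b2 : (c == '\n') = false := by simp [beq_iff_eq]; exact h2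
        simp [pvRepl, pvD2, b1, b2]

theorem pvSplitP_no_delim (p : Char → Bool) (w : List Char) (hw : ∀ c ∈ w, p c = false) :
    pvSplitP p w = [w] := by
  induction w with
  | nil => rfl
  | cons c t ih =>
    have hc := hw c (by simp)
    rw [pvSplitP, if_neg (by simp [hc]), ih (fun x hx => hw x (by simp [hx]))]
    simp

theorem pvSplitP_append_left (p : Char → Bool) (u v : List Char) (hu : ∀ c ∈ u, p c = false) :
    pvSplitP p (u ++ v) = (pvSplitP p v).modifyHead (u ++ ·) := by
  induction u with
  | nil => exact (pvModifyHead_nil_append _).symm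
  | cons c u' ih =>
    have hc := hu c (by simp)
    rw [List.cons_append, pvSplitP, if_neg (by simp [hc]),
      ih (fun x hx => hu x (by simp [hx]))]
    obtain ⟨h0, r0, hE⟩ := List.exists_cons_of_ne_nil (pvSplitP_ne_nil p v)
    simp [hE]

theorem pvSplitP_append_ws (p : Char → Bool) (l w : List Char) (hw : ∀ c ∈ w, p c = false) :
    pvSplitP p (l ++ w) = pvLastAppend (pvSplitP p l) w := by
  induction l with
  | nil =>
    rw [List.nil_append, pvSplitP_no_delim p w hw]
    rfl
  | cons c t ih =>
    by_cases hc : p c = true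
    · rw [List.cons_append, pvSplitP, if_pos hc, ih, pvSplitP, if_pos hc]
      obtain ⟨h0, r0, hE⟩ := List.exists_cons_of_ne_nil (pvSplitP_ne_nil p t)
      rw [hE]
      cases r0 <;> rfl
    · rw [List.cons_append, pvSplitP, if_neg hc, ih, pvSplitP, if_neg hc]
      obtain ⟨h0, r0, hE⟩ := List.exists_cons_of_ne_nil (pvSplitP_ne_nil p t)
      rw [hE]
      cases r0 <;> simp [pvLastAppend]

theorem pvStrip_all_ws (w : List Char) (hw : ∀ c ∈ w, PySem.Chars.isspace c) :
    PySem.Chars.strip w = [] := by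
  have h1 : List.dropWhile PySem.Chars.isspace w = [] := by
    rw [List.dropWhile_eq_nil_iff]; exact fun c hc => hw c hc
  simp [PySem.Chars.strip, PySem.Chars.lstrip, PySem.Chars.rstrip, h1]

theorem pvStrip_ws_prefix (w x : List Char) (hw : ∀ c ∈ w, PySem.Chars.isspace c) :
    PySem.Chars.strip (w ++ x) = PySem.Chars.strip x := by
  have h1 : List.dropWhile PySem.Chars.isspace w = [] := by
    rw [List.dropWhile_eq_nil_iff]; exact fun c hc => hw c hc
  simp [PySem.Chars.strip, PySem.Chars.lstrip, List.dropWhile_append, h1]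

theorem pvRstrip_ws_suffix (y w : List Char) (hw : ∀ c ∈ w, PySem.Chars.isspace c) :
    PySem.Chars.rstrip (y ++ w) = PySem.Chars.rstrip y := by
  have h1 : List.dropWhile PySem.Chars.isspace w.reverse = [] := by
    rw [List.dropWhile_eq_nil_iff]; exact fun c hc => hw c (List.mem_reverse.mp hc)
  simp [PySem.Chars.rstrip, List.reverse_append, List.dropWhile_append, h1]

theorem pvStrip_ws_suffix (x w : List Char) (hw : ∀ c ∈ w, PySem.Chars.isspace c) :
    PySem.Chars.strip (x ++ w) = PySem.Chars.strip x := by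
  have h1 : List.dropWhile PySem.Chars.isspace w = [] := by
    rw [List.dropWhile_eq_nil_iff]; exact fun c hc => hw c hc
  by_cases hx : List.dropWhile PySem.Chars.isspace x = []
  · simp [PySem.Chars.strip, PySem.Chars.lstrip, List.dropWhile_append, hx, h1,
      PySem.Chars.rstrip]
  · have : PySem.Chars.lstrip (x ++ w) = PySem.Chars.lstrip x ++ w := by
      simp [PySem.Chars.lstrip, List.dropWhile_append, hx]
    rw [PySem.Chars.strip, this, PySem.Chars.strip]
    exact pvRstrip_ws_suffix _ _ hw

theorem pvFstrip_all_ws (w : List Char) (hw : ∀ c ∈ w, PySem.Chars.isspace c) :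
    pvFstrip w = none := by
  simp [pvFstrip, pvStrip_all_ws w hw]

theorem pvFstrip_ws_prefix (w x : List Char) (hw : ∀ c ∈ w, PySem.Chars.isspace c) :
    pvFstrip (w ++ x) = pvFstrip x := by
  simp only [pvFstrip, pvStrip_ws_prefix w x hw]

theorem pvFstrip_ws_suffix (x w : List Char) (hw : ∀ c ∈ w, PySem.Chars.isspace c) :
    pvFstrip (x ++ w) = pvFstrip x := by
  simp only [pvFstrip, pvStrip_ws_suffix x w hw]

theorem pvFilterMap_lastAppend (X : List (List Char)) (w : List Char)
    (hw : ∀ c ∈ w, PySem.Chars.isspace c) :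
    (pvLastAppend X w).filterMap pvFstrip = X.filterMap pvFstrip := by
  induction X with
  | nil => simp [pvLastAppend, List.filterMap, pvFstrip_all_ws w hw]
  | cons x xs ih =>
    cases xs with
    | nil => simp [pvLastAppend, List.filterMap_cons, pvFstrip_ws_suffix x w hw]
    | cons y r => simp only [pvLastAppend, List.filterMap_cons, ih]

theorem pvWs_not_semi (c : Char) (h : PySem.Chars.isspace c = true) : pvSemi c = false := by
  by_cases hc : c = ';'
  · subst hc; exact absurd h (by decide)
  · simp [pvSemi, hc]

theorem pvGS_ws_prefix (w z : List Char) (hw : ∀ c ∈ w, PySem.Chars.isspace c) :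
    pvGS (w ++ z) = pvGS z := by
  have hsemi : ∀ c ∈ w, pvSemi c = false := fun c hc => pvWs_not_semi c (hw c hc)
  rw [pvGS, pvGS, pvSplitP_append_left pvSemi w z hsemi]
  obtain ⟨h0, r0, hE⟩ := List.exists_cons_of_ne_nil (pvSplitP_ne_nil pvSemi z)
  rw [hE]
  simp [List.filterMap_cons, pvFstrip_ws_prefix w h0 hw]

theorem pvGS_ws_suffix (z w : List Char) (hw : ∀ c ∈ w, PySem.Chars.isspace c) :
    pvGS (z ++ w) = pvGS z := by
  have hsemi : ∀ c ∈ w, pvSemi c = false := fun c hc => pvWs_not_semi c (hw c hc)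
  rw [pvGS, pvGS, pvSplitP_append_ws pvSemi z w hsemi,
    pvFilterMap_lastAppend _ w hw]

theorem pvGS_strip (x : List Char) : pvGS (PySem.Chars.strip x) = pvGS x := by
  have e1 : pvGS x = pvGS (PySem.Chars.lstrip x) := by
    conv_lhs => rw [show x = x.takeWhile PySem.Chars.isspace ++ PySem.Chars.lstrip x from
      (List.takeWhile_append_dropWhile).symm]
    exact pvGS_ws_prefix _ _ (fun c hc => List.mem_takeWhile_imp hc)
  have e2 : pvGS (PySem.Chars.lstrip x) = pvGS (PySem.Chars.strip x) := by
    have hdec : PySem.Chars.lstrip x = PySem.Chars.strip x ++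
        (List.takeWhile PySem.Chars.isspace (PySem.Chars.lstrip x).reverse).reverse := by
      conv_lhs => rw [show PySem.Chars.lstrip x = (PySem.Chars.lstrip x).reverse.reverse by simp]
      conv_lhs => rw [show (PySem.Chars.lstrip x).reverse =
        List.takeWhile PySem.Chars.isspace (PySem.Chars.lstrip x).reverse ++
        List.dropWhile PySem.Chars.isspace (PySem.Chars.lstrip x).reverse from
        (List.takeWhile_append_dropWhile).symm]
      rw [List.reverse_append]
      rfl
    conv_lhs => rw [hdec]
    exact pvGS_ws_suffix _ _ (fun c hc => List.mem_takeWhile_imp (List.mem_reverse.mp hc))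
  rw [← e2, ← e1]

theorem pvLine_eq (line : List Char) :
    (if PySem.Chars.strip line = [] then ([] : List (List Char)) else pvGS (PySem.Chars.strip line))
      = pvGS line := by
  by_cases h : PySem.Chars.strip line = []
  · rw [if_pos h, ← pvGS_strip line, h]
    rfl
  · rw [if_neg h, pvGS_strip]

theorem pvDelim_not_semi (c : Char) (h : pvDelim c = false) : pvSemi c = false := by
  simp [pvDelim] at h
  simp [pvSemi, h.2]

theorem pvMain (t : List Char) : ∀ acc : List Char, (∀ c ∈ acc, pvDelim c = false) →
    ((pvSplitP pvDelim t).modifyHead (acc ++ ·)).filterMap pvFstrip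
      = ((pvSplitP pvD2 t).modifyHead (acc ++ ·)).flatMap pvGS := by
  induction t with
  | nil =>
    intro acc hacc
    have hsemi : ∀ c ∈ acc, pvSemi c = false := fun c hc => pvDelim_not_semi c (hacc c hc)
    simp only [pvSplitP, List.modifyHead_cons, List.append_nil, List.flatMap_cons,
      List.flatMap_nil]
    rw [pvGS, pvSplitP_no_delim pvSemi acc hsemi]
  | cons c t ih =>
    intro acc hacc
    have ihnil : (pvSplitP pvDelim t).filterMap pvFstrip
        = (pvSplitP pvD2 t).flatMap pvGS := by
      have := ih [] (by simp)
      rwa [pvModifyHead_nil_append, pvModifyHead_nil_append] at this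
    have hsemi : ∀ x ∈ acc, pvSemi x = false := fun x hx => pvDelim_not_semi x (hacc x hx)
    by_cases hD : pvDelim c = true
    · rw [pvSplitP, if_pos hD, List.modifyHead_cons, List.append_nil]
      by_cases hD2 : pvD2 c = true
      · rw [pvSplitP, if_pos hD2, List.modifyHead_cons, List.append_nil, List.flatMap_cons]
        rw [show pvGS acc = List.filterMap pvFstrip [acc] from by
          rw [pvGS, pvSplitP_no_delim pvSemi acc hsemi]]
        rw [← ihnil]
        cases hf : pvFstrip acc <;> simp [List.filterMap_cons, hf]
      · have hsc : c = ';' := by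
          simp [pvDelim] at hD
          simp [pvD2] at hD2
          rcases hD with h | h
          · rcases h with h | h
            · exact absurd h hD2.1
            · exact absurd h hD2.2
          · exact h
        subst hsc
        rw [pvSplitP, if_neg (by simp [hD2]), pvModifyHead_comp]
        obtain ⟨h0, r0, hE⟩ := List.exists_cons_of_ne_nil (pvSplitP_ne_nil pvD2 t)
        rw [hE, List.modifyHead_cons, List.flatMap_cons]
        have hGS : pvGS ((acc ++ [';']) ++ h0) = (List.filterMap pvFstrip [acc]) ++ pvGS h0 := by
          rw [show (acc ++ [';']) ++ h0 = acc ++ (';' :: h0) from by simp]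
          rw [pvGS, pvSplitP_append_left pvSemi acc (';' :: h0) hsemi]
          rw [pvSplitP, if_pos (by decide), List.modifyHead_cons, List.append_nil]
          cases hf : pvFstrip acc <;> simp [List.filterMap_cons, hf, pvGS]
        rw [hGS]
        have ih2 : (pvSplitP pvDelim t).filterMap pvFstrip = pvGS h0 ++ r0.flatMap pvGS := by
          rw [ihnil, hE, List.flatMap_cons]
        cases hf : pvFstrip acc <;> simp [List.filterMap_cons, hf, ih2]
    · have hD' : pvDelim c = false := by simpa using hD
      have hD2 : pvD2 c = false := by
        simp [pvDelim] at hD'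
        simp [pvD2, hD'.1.1, hD'.1.2]
      rw [pvSplitP, if_neg (by simp [hD']), pvModifyHead_comp,
        pvSplitP, if_neg (by simp [hD2]), pvModifyHead_comp]
      exact ih (acc ++ [c]) (by
        intro x hx
        rcases List.mem_append.mp hx with hmem | hmem
        · exact hacc x hmem
        · simp at hmem; subst hmem; exact hD')

-- the shared tail (fallback + truncation) applied to the canonical chunk list
def pvFinal (s : String) (m : Int) : List String :=
  let chunks := (pvCore s.toList).map String.ofList
  let chunks :=
    if chunks = [] then
      let stripped := PySem.Str.strip s
      if stripped ≠ "" then [stripped] else []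
    else chunks
  if m > 0 then PySem.List.slice chunks none (some m) else chunks

theorem pvOfList_eq_empty (l : List Char) : (String.ofList l = "") ↔ l = [] := by
  constructor
  · intro h
    have := congrArg String.toList h
    simpa using this
  · intro h; subst h; rfl

theorem pvStrStrip_ofList (l : List Char) :
    PySem.Str.strip (String.ofList l) = String.ofList (PySem.Chars.strip l) := by
  rw [PySem.Str.strip, String.toList_ofList]

theorem pvInner_fold (P : List (List Char)) (acc : List String) :
    (P.map String.ofList).foldl (fun chunks piece =>
        let item := PySem.Str.strip piece
        if item ≠ "" then chunks ++ [item] else chunks) acc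
      = acc ++ (P.filterMap pvFstrip).map String.ofList := by
  induction P generalizing acc with
  | nil => simp
  | cons p ps ih =>
    simp only [List.map_cons, List.foldl_cons, pvStrStrip_ofList]
    by_cases hq : PySem.Chars.strip p = []
    · rw [if_neg (by simp [pvOfList_eq_empty, hq]), ih]
      simp [List.filterMap_cons, pvFstrip, hq]
    · rw [if_pos (by simp [pvOfList_eq_empty, hq]), ih]
      simp [List.filterMap_cons, pvFstrip, hq]

theorem pvSplitSemi_str (part : String) :
    (PySem.Str.split? part ";").getD []
      = (pvSplitP pvSemi part.toList).map String.ofList := by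
  rw [PySem.Str.split?]
  have : PySem.Chars.split? part.toList (";").toList
      = some (pvSplitP pvSemi part.toList) := by
    rw [show (";").toList = [';'] from by decide, PySem.Chars.split?]
    rw [if_neg (by simp), pvSplitOn_single]
    rfl
  rw [this]
  rfl

theorem pvA_fold (L : List (List Char)) (acc : List String) :
    (L.map String.ofList).foldl (fun chunks raw =>
        let part := PySem.Str.strip raw
        if part = "" then chunks
        else
          ((PySem.Str.split? part ";").getD []).foldl (fun chunks piece =>
            let item := PySem.Str.strip piece
            if item ≠ "" then chunks ++ [item] else chunks) chunks) acc
      = acc ++ (L.flatMap pvGS).map String.ofList := by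
  induction L generalizing acc with
  | nil => simp
  | cons line Ls ih =>
    simp only [List.map_cons, List.foldl_cons, pvStrStrip_ofList]
    by_cases hq : PySem.Chars.strip line = []
    · rw [if_pos (by simp [pvOfList_eq_empty, hq]), ih]
      have hGS : pvGS line = [] := by
        rw [← pvLine_eq line, if_pos hq]
      simp [hGS]
    · rw [if_neg (by simp [pvOfList_eq_empty, hq])]
      rw [pvSplitSemi_str, String.toList_ofList, pvInner_fold, ih]
      have : (pvSplitP pvSemi (PySem.Chars.strip line)).filterMap pvFstrip = pvGS line := by
        rw [← pvGS_strip line]; rfl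
      rw [this]
      simp

theorem pvCore_eq_flat (cs : List Char) :
    (pvSplitP pvD2 cs).flatMap pvGS = pvCore cs := by
  have := pvMain cs [] (by simp)
  rw [pvModifyHead_nil_append, pvModifyHead_nil_append] at this
  exact this.symm

theorem pvA_eq (s : String) (m : Int) : split_plan_steps_py s m = pvFinal s m := by
  rw [split_plan_steps_py, pvFinal]
  have htext : (PySem.Str.replace s "\r" "\n").toList = s.toList.map pvRepl := by
    rw [PySem.Str.toList_replace, show ("\r").toList = ['\r'] from by decide,
      show ("\n").toList = ['\n'] from by decide, pvReplace_single]
  have hsplit : (PySem.Str.split? (PySem.Str.replace s "\r" "\n") "\n").getD []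
      = (pvSplitP pvD2 s.toList).map String.ofList := by
    rw [PySem.Str.split?]
    rw [show ("\n").toList = ['\n'] from by decide, PySem.Chars.split?]
    rw [if_neg (by simp), htext, pvSplitOn_single, pvSplitP_map_repl]
    rfl
  rw [hsplit, pvA_fold, pvCore_eq_flat]
  simp

def pvStepB (st : List String × List Char) (ch : Char) : List String × List Char :=
  if ch == '\x0d' || ch == '\n' || ch == ';' then
    let item := PySem.Str.strip (String.ofList st.2)
    (if item ≠ "" then st.1 ++ [item] else st.1, [])
  else (st.1, st.2 ++ [ch])

theorem pvStepB_eq :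
    (fun (st : List String × List Char) ch =>
      if ch == '\x0d' || ch == '\n' || ch == ';' then
        let item := PySem.Str.strip (String.ofList st.2)
        (if item ≠ "" then st.1 ++ [item] else st.1, [])
      else (st.1, st.2 ++ [ch])) = pvStepB := rfl

theorem pvStepB_delim (chunks : List String) (cur : List Char) (ch : Char)
    (h : (ch == '\x0d' || ch == '\n' || ch == ';') = true) :
    pvStepB (chunks, cur) ch
      = (chunks ++ (List.filterMap pvFstrip [cur]).map String.ofList, []) := by
  rw [pvStepB, if_pos h]
  simp only [pvStrStrip_ofList]
  by_cases hq : PySem.Chars.strip cur = []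
  · rw [if_neg (by simp [pvOfList_eq_empty, hq])]
    simp [List.filterMap_cons, pvFstrip, hq]
  · rw [if_pos (by simp [pvOfList_eq_empty, hq])]
    simp [List.filterMap_cons, pvFstrip, hq]

theorem pvStepB_other (chunks : List String) (cur : List Char) (ch : Char)
    (h : (ch == '\x0d' || ch == '\n' || ch == ';') = false) :
    pvStepB (chunks, cur) ch = (chunks, cur ++ [ch]) := by
  rw [pvStepB, if_neg (by simp [h])]

theorem pvB_scan (l : List Char) : ∀ (chunks : List String) (cur : List Char),
    ((l ++ ['\n']).foldl pvStepB (chunks, cur)).1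
      = chunks ++ (((pvSplitP pvDelim l).modifyHead (cur ++ ·)).filterMap pvFstrip).map String.ofList := by
  induction l with
  | nil =>
    intro chunks cur
    simp only [List.nil_append, List.foldl_cons, List.foldl_nil]
    rw [pvStepB_delim chunks cur '\n' (by decide)]
    simp only [pvSplitP, List.modifyHead_cons, List.append_nil]
  | cons c t ih =>
    intro chunks cur
    simp only [List.cons_append, List.foldl_cons]
    by_cases hD : pvDelim c = true
    · rw [pvStepB_delim chunks cur c (by simpa [pvDelim] using hD)]
      rw [ih _ [], pvModifyHead_nil_append]
      rw [pvSplitP, if_pos hD, List.modifyHead_cons, List.append_nil]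
      cases hf : pvFstrip cur <;> simp [List.filterMap_cons, hf]
    · rw [pvStepB_other chunks cur c (by simpa [pvDelim] using hD)]
      rw [ih chunks (cur ++ [c]), pvSplitP, if_neg (by simpa using hD), pvModifyHead_comp]

theorem pvB_eq (s : String) (m : Int) : split_plan_steps_py_alt s m = pvFinal s m := by
  rw [split_plan_steps_py_alt, pvFinal]
  rw [pvStepB_eq, pvB_scan s.toList [] []]
  rw [show (pvSplitP pvDelim s.toList).modifyHead (([] : List Char) ++ ·)
      = pvSplitP pvDelim s.toList from pvModifyHead_nil_append _]
  rfl

-- ===== VERDICT (by name: the statement is the Claim_ definition above) =====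
theorem split_plan_steps_py_spec : Claim_equal_split_plan_steps_py := by
  intro s m _
  unfold Spec_split_plan_steps_py
  rw [pvA_eq, pvB_eq]
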